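-- pv_equiv track=rewrite | github.com/amalieshi/advent_of_code2023 | day3/engine_gear_func.py | extract_value_from_part_number_index
-- ===== SOURCE A (Python) =====
-- def extract_value_from_part_number_index(index, doc):
--     r = index[0]
--     c = index[1]
--     row_schema = list(doc[r])
--     reversed_value = []
--     for i in reversed(row_schema[:c]):
--         if i.isdigit():
--             reversed_value.append(i)
--         else:
--             break
--     start_value = "".join(reversed(reversed_value))
--     end_value = []
--     for i in row_schema[c:]:
--         if i.isdigit():
--             end_value.append(i)
--         else:
--             break
--     start_value = "".join(reversed(reversed_value))
--     end_value = "".join(end_value)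
--     final_value = start_value + end_value
--     return final_value
-- ===== SOURCE B (Python) =====
-- def extract_value_from_part_number_index(index, doc):
--     r, c = index
--     row = doc[r]
--     left, right = row[:c], row[c:]
--     i = len(left)
--     while i > 0 and left[i - 1].isdigit():
--         i -= 1
--     j = 0
--     while j < len(right) and right[j].isdigit():
--         j += 1
--     return left[i:] + right[:j]
-- ===== Notes on version B (the rewrite author's own statement) =====
-- stated objective: simpler
-- what changed: B splits the row at c and walks two index pointers to find the digit-run boundaries, returning two slices, instead of building two accumulator lists character by character from reversed/forward scans and joining them.
import Mathlib
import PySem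

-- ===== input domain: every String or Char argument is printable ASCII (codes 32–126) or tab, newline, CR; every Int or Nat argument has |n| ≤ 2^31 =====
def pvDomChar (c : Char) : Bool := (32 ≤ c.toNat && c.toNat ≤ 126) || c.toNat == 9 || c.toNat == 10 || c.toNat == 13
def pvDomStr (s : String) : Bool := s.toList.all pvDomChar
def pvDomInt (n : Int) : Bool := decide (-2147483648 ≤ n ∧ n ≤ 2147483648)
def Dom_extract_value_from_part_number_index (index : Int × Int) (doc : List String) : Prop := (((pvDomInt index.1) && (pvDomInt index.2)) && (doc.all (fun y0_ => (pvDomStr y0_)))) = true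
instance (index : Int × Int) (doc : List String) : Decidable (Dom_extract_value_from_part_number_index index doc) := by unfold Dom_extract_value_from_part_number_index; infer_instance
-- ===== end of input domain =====

-- B splits the row at c and walks two index pointers to the digit-run boundaries,
-- returning two slices, instead of A's character-by-character accumulator lists and joins.

-- ===== PORT A =====
-- the 'for … : if i.isdigit(): acc.append(i) else: break' loop (shared shape of A's two loops)
def pvALoop (xs : List Char) (acc : List Char) : List Char :=
  match xs with
  | [] => acc
  | i :: rest => if PySem.Chars.isdigit i then pvALoop rest (acc ++ [i]) else acc

def extract_value_from_part_number_index (index : Int × Int) (doc : List String) : String :=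
  let r := index.1
  let c := index.2
  let row_schema := (PySem.List.pyGetD doc r "").toList   -- list(doc[r]); Pre_ guarantees r is in range
  let reversed_value := pvALoop (PySem.List.slice row_schema none (some c)).reverse []
  let end_value := pvALoop (PySem.List.slice row_schema (some c) none) []
  -- "".join(reversed(reversed_value)) + "".join(end_value)  (the two joins fused into one ofList)
  String.ofList (reversed_value.reverse ++ end_value)

-- ===== PORT B =====
-- while i > 0 and left[i - 1].isdigit(): i -= 1
def pvBLeft (xs : List Char) : Nat → Nat
  | 0 => 0
  | s + 1 => if PySem.Chars.isdigit (xs.getD s ' ') then pvBLeft xs s else s + 1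

-- while j < len(right) and right[j].isdigit(): j += 1
def pvBRight (xs : List Char) (j : Nat) : Nat :=
  if h : j < xs.length ∧ PySem.Chars.isdigit (xs.getD j ' ') then pvBRight xs (j + 1) else j
termination_by xs.length - j

def extract_value_from_part_number_index_alt (index : Int × Int) (doc : List String) : String :=
  let r := index.1
  let c := index.2
  let row := (PySem.List.pyGetD doc r "").toList           -- doc[r]; Pre_ guarantees r is in range
  let left := PySem.List.slice row none (some c)            -- row[:c]
  let right := PySem.List.slice row (some c) none           -- row[c:]
  let i := pvBLeft left left.length
  let j := pvBRight right 0
  String.ofList (left.drop i ++ right.take j)               -- left[i:] + right[:j]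

-- ===== PRECONDITION & SPEC =====
-- Pre_ excludes exactly the inputs where doc[index[0]] raises IndexError (both A and B raise there).
def Pre_extract_value_from_part_number_index (index : Int × Int) (doc : List String) : Prop :=
  PySem.Raise.InRange doc.length index.1
instance (index : Int × Int) (doc : List String) : Decidable (Pre_extract_value_from_part_number_index index doc) := by unfold Pre_extract_value_from_part_number_index; infer_instance

def pvWitness_extract_value_from_part_number_index : (Int × Int) × List String := ((0, 2), ["a12b"])

def Spec_extract_value_from_part_number_index (index : Int × Int) (doc : List String) (out : String) : Prop := out = extract_value_from_part_number_index_alt index doc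
instance (index : Int × Int) (doc : List String) (out : String) : Decidable (Spec_extract_value_from_part_number_index index doc out) := by unfold Spec_extract_value_from_part_number_index; infer_instance

-- ===== CLAIM (what is proved, stated in full; the proofs are below) =====
def Claim_equal_extract_value_from_part_number_index : Prop := ∀ (index : Int × Int) (doc : List String), Dom_extract_value_from_part_number_index index doc → Pre_extract_value_from_part_number_index index doc → Spec_extract_value_from_part_number_index index doc (extract_value_from_part_number_index index doc)

-- ===== LEMMAS AND PROOFS =====
theorem pvALoop_eq_takeWhile (xs acc : List Char) :
    pvALoop xs acc = acc ++ xs.takeWhile PySem.Chars.isdigit := by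
  induction xs generalizing acc with
  | nil => simp [pvALoop]
  | cons i rest ih =>
    simp only [pvALoop, List.takeWhile]
    by_cases h : PySem.Chars.isdigit i <;> simp [h, ih]

theorem pvBRight_eq (xs : List Char) (j : Nat) :
    pvBRight xs j = j + ((xs.drop j).takeWhile PySem.Chars.isdigit).length := by
  fun_induction pvBRight xs j with
  | case1 j h ih =>
    obtain ⟨he, hd⟩ := h
    rw [ih, List.drop_eq_getElem_cons he]
    rw [List.getD_eq_getElem _ _ he] at hd
    simp [List.takeWhile, hd]; omega
  | case2 j h =>
    by_cases he : j < xs.length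
    · have hd : ¬ PySem.Chars.isdigit (xs.getD j ' ') := by tauto
      rw [List.drop_eq_getElem_cons he]
      rw [List.getD_eq_getElem _ _ he] at hd
      simp [List.takeWhile, hd]
    · simp [List.drop_eq_nil_of_le (by omega : xs.length ≤ j)]

theorem pvBLeft_eq (xs : List Char) (s : Nat) (hs : s ≤ xs.length) :
    pvBLeft xs s = s - ((xs.take s).reverse.takeWhile PySem.Chars.isdigit).length := by
  induction s with
  | zero => simp [pvBLeft]
  | succ s ih =>
    have hlt : s < xs.length := by omega
    have hgd : xs.getD s ' ' = xs[s] := List.getD_eq_getElem _ _ hlt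
    have hrev : (xs.take (s+1)).reverse = xs[s] :: (xs.take s).reverse := by
      rw [List.take_add_one, List.getElem?_eq_getElem hlt]; simp
    have hL : ((xs.take s).reverse.takeWhile PySem.Chars.isdigit).length ≤ s := by
      calc _ ≤ (xs.take s).reverse.length := (List.takeWhile_prefix _).length_le
        _ ≤ s := by simp
    rw [pvBLeft, hgd, hrev]
    by_cases hd : PySem.Chars.isdigit xs[s]
    · rw [if_pos hd, ih (by omega), List.takeWhile_cons_of_pos hd]
      simp only [List.length_cons]; omega
    · rw [if_neg hd, List.takeWhile_cons_of_neg (by simp [hd])]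
      simp

theorem take_takeWhile_length (p : Char → Bool) (xs : List Char) :
    xs.take (xs.takeWhile p).length = xs.takeWhile p := by
  induction xs with
  | nil => simp
  | cons x t ih => by_cases h : p x <;> simp [List.takeWhile, h, ih]

-- dropping everything before the trailing digit run leaves exactly that run
theorem drop_rev_takeWhile (p : Char → Bool) (xs : List Char) :
    xs.drop (xs.length - (xs.reverse.takeWhile p).length) = (xs.reverse.takeWhile p).reverse := by
  set tw := xs.reverse.takeWhile p with htw
  set dw := xs.reverse.dropWhile p with hdw
  have hsplit : tw ++ dw = xs.reverse := List.takeWhile_append_dropWhile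
  have hxs : xs = dw.reverse ++ tw.reverse := by
    calc xs = xs.reverse.reverse := by simp
      _ = (tw ++ dw).reverse := by rw [hsplit]
      _ = dw.reverse ++ tw.reverse := by simp
  have hlen : tw.length + dw.length = xs.length := by
    have := congrArg List.length hsplit; simpa using this
  have hi : xs.length - tw.length = dw.reverse.length := by
    simp only [List.length_reverse]; omega
  rw [hi, hxs, List.drop_append_of_le_length (le_refl _), List.drop_length, List.nil_append]

-- ===== VERDICT (by name: the statement is the Claim_ definition above) =====
theorem extract_value_from_part_number_index_spec : Claim_equal_extract_value_from_part_number_index := by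
  intro index doc _ _
  unfold Spec_extract_value_from_part_number_index
  unfold extract_value_from_part_number_index extract_value_from_part_number_index_alt
  simp only [pvALoop_eq_takeWhile, List.nil_append]
  rw [pvBLeft_eq _ _ (le_refl _), pvBRight_eq, List.drop_zero, Nat.zero_add,
    take_takeWhile_length]
  simp only [List.take_length]
  rw [drop_rev_takeWhile]
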